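-- pv_equiv track=rewrite | github.com/tinotendanyashanu/zimprep | backend/app/engines/question_delivery/rules/navigation_rules.py | get_allowed_indices
-- ===== SOURCE A (Python) =====
-- from typing import List, Tuple
--
-- class NavigationMode:
--     """Supported navigation modes."""
--     FORWARD_ONLY = "forward_only"
--     SECTION_BASED = "section_based"
--     FREE = "free"
--
-- def get_allowed_indices(
--     total_questions: int,
--     navigation_mode: str,
--     current_section: int = 0,
--     section_boundaries: List[Tuple[int, int]] = None,
--     locked_questions: List[int] = None
-- ) -> List[int]:
--     """Get list of allowed question indices.
--
--     Args:
--         total_questions: Total questions in exam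
--         navigation_mode: Navigation mode
--         current_section: Current section index (for section-based)
--         section_boundaries: List of (start, end) tuples for sections
--         locked_questions: Already locked questions
--
--     Returns:
--         List of allowed question indices
--     """
--     locked = locked_questions or []
--
--     # Free navigation: all unlocked questions
--     if navigation_mode == NavigationMode.FREE:
--         return [i for i in range(total_questions) if i not in locked]
--
--     # Section-based: only current section
--     if navigation_mode == NavigationMode.SECTION_BASED and section_boundaries:
--         if current_section < len(section_boundaries):
--             start, end = section_boundaries[current_section]
--             return [i for i in range(start, end + 1) if i not in locked]
--
--     # Forward-only: all questions (but navigation rules enforce forward-only)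
--     return [i for i in range(total_questions) if i not in locked]
-- ===== SOURCE B (Python) =====
-- def get_allowed_indices(
--     total_questions,
--     navigation_mode,
--     current_section=0,
--     section_boundaries=None,
--     locked_questions=None,
-- ):
--     # Determine the candidate half-open range [lo, hi) for this navigation mode.
--     if (navigation_mode == "section_based" and section_boundaries
--             and current_section < len(section_boundaries)):
--         start, end = section_boundaries[current_section]
--         lo, hi = start, end + 1
--     else:
--         lo, hi = 0, total_questions
--     # Gap emission: walk the sorted distinct locked indices and emit the
--     # contiguous runs of allowed indices between them. No per-index membership test.
--     out = []
--     cur = lo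
--     for q in sorted(set(locked_questions or [])):
--         if q >= hi:
--             break
--         if q >= cur:
--             out.extend(range(cur, q))
--             cur = q + 1
--     out.extend(range(cur, hi))
--     return out
-- ===== Notes on version B (the rewrite author's own statement) =====
-- stated objective: faster
-- what changed: Replaces A's per-index 'i not in locked' list scans with gap emission: sort the distinct locked indices once, then emit whole contiguous runs of allowed indices between consecutive locked values (early break past the upper bound), so no membership test is performed at all.
-- outside the precondition, e.g. on get_allowed_indices(3, 'section_based', -2, [(0, 2)], []): A raises IndexError, B raises IndexError
import Mathlib
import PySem

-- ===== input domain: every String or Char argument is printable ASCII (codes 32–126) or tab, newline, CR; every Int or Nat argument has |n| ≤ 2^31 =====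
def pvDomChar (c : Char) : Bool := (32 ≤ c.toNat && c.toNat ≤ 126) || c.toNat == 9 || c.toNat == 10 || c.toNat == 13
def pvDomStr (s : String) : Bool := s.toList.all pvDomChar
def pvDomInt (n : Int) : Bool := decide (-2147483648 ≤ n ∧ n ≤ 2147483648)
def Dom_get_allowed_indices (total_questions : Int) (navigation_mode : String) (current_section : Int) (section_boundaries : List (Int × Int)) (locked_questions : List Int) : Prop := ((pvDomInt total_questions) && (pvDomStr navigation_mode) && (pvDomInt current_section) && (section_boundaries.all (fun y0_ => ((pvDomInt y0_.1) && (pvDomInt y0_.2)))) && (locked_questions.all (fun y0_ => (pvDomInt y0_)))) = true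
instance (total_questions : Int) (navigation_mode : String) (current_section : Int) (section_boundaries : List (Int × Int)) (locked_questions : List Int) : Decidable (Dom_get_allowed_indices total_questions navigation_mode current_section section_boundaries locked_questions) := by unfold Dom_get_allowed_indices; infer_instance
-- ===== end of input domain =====

-- B replaces A's per-index membership filters with gap emission over the sorted distinct
-- locked indices (objective: faster, O(n + m log m) instead of O(n*m)).

-- ===== PORT A =====
def get_allowed_indices (total_questions : Int) (navigation_mode : String) (current_section : Int) (section_boundaries : List (Int × Int)) (locked_questions : List Int) : List Int :=
  let locked := locked_questions  -- 'locked_questions or []': an empty/None list becomes [], same value here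
  -- Free navigation: all unlocked questions
  if navigation_mode = "free" then
    (PySem.List.pyRange 0 total_questions 1).filter (fun i => !locked.contains i)
  -- Section-based: only current section
  else if navigation_mode = "section_based" ∧ section_boundaries ≠ [] ∧ current_section < (section_boundaries.length : Int) then
    match PySem.List.pyGet? section_boundaries current_section with
    | some (s, e) => (PySem.List.pyRange s (e + 1) 1).filter (fun i => !locked.contains i)
    | none => []  -- IndexError in Python; excluded by Pre_
  -- Forward-only / fall-through: all questions
  else
    (PySem.List.pyRange 0 total_questions 1).filter (fun i => !locked.contains i)

-- ===== PORT B =====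
-- 'for q in L: if q >= hi: break; if q >= cur: out.extend(range(cur, q)); cur = q + 1'
-- followed by 'out.extend(range(cur, hi))'; break = returning with the final extend.
def pvEmitGaps (hi : Int) : List Int → Int → List Int → List Int
  | [], cur, out => out ++ PySem.List.pyRange cur hi 1
  | q :: rest, cur, out =>
      if hi ≤ q then out ++ PySem.List.pyRange cur hi 1
      else if cur ≤ q then pvEmitGaps hi rest (q + 1) (out ++ PySem.List.pyRange cur q 1)
      else pvEmitGaps hi rest cur out

def get_allowed_indices_alt (total_questions : Int) (navigation_mode : String) (current_section : Int) (section_boundaries : List (Int × Int)) (locked_questions : List Int) : List Int :=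
  let bounds : Int × Int :=
    if navigation_mode = "section_based" ∧ section_boundaries ≠ [] ∧ current_section < (section_boundaries.length : Int) then
      match PySem.List.pyGet? section_boundaries current_section with
      | some (s, e) => (s, e + 1)
      | none => (0, 0)  -- IndexError in Python; excluded by Pre_
    else
      (0, total_questions)
  pvEmitGaps bounds.2 (PySem.List.sorted (PySem.Set.ofList locked_questions) (fun x => x) false) bounds.1 []

-- ===== PRECONDITION & SPEC =====
-- Pre_ excludes only the inputs where BOTH Pythons raise IndexError: section-based mode with a
-- nonempty boundary list and a negative current_section below -len(section_boundaries).
def Pre_get_allowed_indices (total_questions : Int) (navigation_mode : String) (current_section : Int) (section_boundaries : List (Int × Int)) (locked_questions : List Int) : Prop :=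
  ¬ (navigation_mode = "section_based" ∧ section_boundaries ≠ [] ∧ current_section < -(section_boundaries.length : Int))
instance (total_questions : Int) (navigation_mode : String) (current_section : Int) (section_boundaries : List (Int × Int)) (locked_questions : List Int) : Decidable (Pre_get_allowed_indices total_questions navigation_mode current_section section_boundaries locked_questions) := by unfold Pre_get_allowed_indices; infer_instance
def pvWitness_get_allowed_indices : Int × String × Int × (List (Int × Int)) × List Int := (5, "section_based", 0, [(1, 3)], [2])
def Spec_get_allowed_indices (total_questions : Int) (navigation_mode : String) (current_section : Int) (section_boundaries : List (Int × Int)) (locked_questions : List Int) (out : List Int) : Prop := out = get_allowed_indices_alt total_questions navigation_mode current_section section_boundaries locked_questions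
instance (total_questions : Int) (navigation_mode : String) (current_section : Int) (section_boundaries : List (Int × Int)) (locked_questions : List Int) (out : List Int) : Decidable (Spec_get_allowed_indices total_questions navigation_mode current_section section_boundaries locked_questions out) := by unfold Spec_get_allowed_indices; infer_instance

-- ===== CLAIM =====
def Claim_equal_get_allowed_indices : Prop := ∀ (total_questions : Int) (navigation_mode : String) (current_section : Int) (section_boundaries : List (Int × Int)) (locked_questions : List Int), Dom_get_allowed_indices total_questions navigation_mode current_section section_boundaries locked_questions → Pre_get_allowed_indices total_questions navigation_mode current_section section_boundaries locked_questions → Spec_get_allowed_indices total_questions navigation_mode current_section section_boundaries locked_questions (get_allowed_indices total_questions navigation_mode current_section section_boundaries locked_questions)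

-- ===== LEMMAS AND PROOFS =====

-- Gap emission over a strictly increasing list L of locked values produces exactly the
-- filtered ascending range: out ++ [i ∈ [cur, hi) | i ∉ L].
lemma pvEmitGaps_eq (hi : Int) (L : List Int) :
    L.Pairwise (· < ·) → ∀ (cur : Int) (out : List Int),
    pvEmitGaps hi L cur out = out ++ (PySem.List.pyRange cur hi 1).filter (fun i => !L.contains i) := by
  induction L with
  | nil =>
    intro _ cur out
    simp [pvEmitGaps]
  | cons q rest ih =>
    intro hpw cur out
    have h1 : ∀ x ∈ rest, q < x := fun x hx => List.rel_of_pairwise_cons hpw hx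
    have hrest := hpw.of_cons
    by_cases hq : hi ≤ q
    · -- break: every i in [cur,hi) has i < hi ≤ q, hence i ∉ q::rest
      have : (PySem.List.pyRange cur hi 1).filter (fun i => !(q :: rest).contains i)
          = PySem.List.pyRange cur hi 1 := by
        apply List.filter_eq_self.mpr
        intro i hi_mem
        have hib := (PySem.List.mem_pyRange_one).mp hi_mem
        simp only [List.contains_cons, Bool.not_eq_eq_eq_not, Bool.not_true, Bool.or_eq_false_iff,
          beq_eq_false_iff_ne, ne_eq]
        refine ⟨by omega, ?_⟩
        simp only [List.contains_eq_mem, decide_eq_false_iff_not]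
        intro hmem
        have := h1 i hmem
        omega
      rw [pvEmitGaps, if_pos hq, this]
    · push_neg at hq
      by_cases hcur : cur ≤ q
      · -- emit [cur, q), skip q, continue from q+1
        rw [pvEmitGaps, if_neg (by omega), if_pos hcur, ih hrest (q + 1) _]
        have hsplit : PySem.List.pyRange cur hi 1
            = PySem.List.pyRange cur q 1 ++ q :: PySem.List.pyRange (q + 1) hi 1 := by
          rw [PySem.List.pyRange_one_append cur q hi hcur (by omega),
            PySem.List.pyRange_one_cons hq]
        rw [hsplit, List.filter_append, List.filter_cons]
        rw [if_neg (by simp)]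
        have hlow : (PySem.List.pyRange cur q 1).filter (fun i => !(q :: rest).contains i)
            = PySem.List.pyRange cur q 1 := by
          apply List.filter_eq_self.mpr
          intro i hi_mem
          have hib := (PySem.List.mem_pyRange_one).mp hi_mem
          simp only [List.contains_cons, Bool.not_eq_eq_eq_not, Bool.not_true, Bool.or_eq_false_iff,
            beq_eq_false_iff_ne, ne_eq]
          refine ⟨by omega, ?_⟩
          simp only [List.contains_eq_mem, decide_eq_false_iff_not]
          intro hmem
          have := h1 i hmem
          omega
        have hhigh : (PySem.List.pyRange (q + 1) hi 1).filter (fun i => !(q :: rest).contains i)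
            = (PySem.List.pyRange (q + 1) hi 1).filter (fun i => !rest.contains i) := by
          apply List.filter_congr
          intro i hi_mem
          have hib := (PySem.List.mem_pyRange_one).mp hi_mem
          simp only [List.contains_cons]
          have : (i == q) = false := by simp; omega
          rw [this, Bool.false_or]
        rw [hlow, hhigh, List.append_assoc]
      · -- q < cur: q is below the range, skip it
        push_neg at hcur
        rw [pvEmitGaps, if_neg (by omega), if_neg (by omega), ih hrest cur out]
        congr 1
        apply List.filter_congr
        intro i hi_mem
        have hib := (PySem.List.mem_pyRange_one).mp hi_mem
        simp only [List.contains_cons]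
        have : (i == q) = false := by simp; omega
        rw [this, Bool.false_or]

-- B's whole pipeline on bounds (lo, hi) equals A's filtering comprehension over range(lo, hi).
lemma emit_eq_filter (lo hi : Int) (lq : List Int) :
    pvEmitGaps hi (PySem.List.sorted (PySem.Set.ofList lq) (fun x => x) false) lo []
      = (PySem.List.pyRange lo hi 1).filter (fun i => !lq.contains i) := by
  set L := PySem.List.sorted (PySem.Set.ofList lq) (fun x => x) false with hL
  have hpw : L.Pairwise (· < ·) := PySem.List.sorted_ofList_pairwise_lt lq
  rw [pvEmitGaps_eq hi L hpw lo [], List.nil_append]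
  apply List.filter_congr
  intro i _
  have : L.contains i = lq.contains i := by
    simp only [List.contains_eq_mem, hL,
      PySem.List.mem_sorted, PySem.Set.mem_ofList]
  rw [this]

-- ===== VERDICT =====
theorem get_allowed_indices_spec : Claim_equal_get_allowed_indices := by
  intro tq nm cs sb lq _ hpre
  unfold Spec_get_allowed_indices get_allowed_indices get_allowed_indices_alt
  by_cases hfree : nm = "free"
  · have hsec : ¬ (nm = "section_based" ∧ sb ≠ [] ∧ cs < (sb.length : Int)) := by
      rintro ⟨h, -, -⟩; rw [hfree] at h; exact absurd h (by decide)
    simp only [if_pos hfree, if_neg hsec]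
    exact (emit_eq_filter 0 tq lq).symm
  · simp only [if_neg hfree]
    by_cases hsec : nm = "section_based" ∧ sb ≠ [] ∧ cs < (sb.length : Int)
    · simp only [if_pos hsec]
      rcases hsec with ⟨hnm, hne, hlt⟩
      have hge : -(sb.length : Int) ≤ cs := by
        unfold Pre_get_allowed_indices at hpre
        by_contra h
        exact hpre ⟨hnm, hne, by omega⟩
      have hir : PySem.Raise.InRange sb.length cs := by
        simp [PySem.Raise.InRange]; omega
      rcases hp : PySem.List.pyGet? sb cs with _ | ⟨s, e⟩
      · exact absurd ((PySem.List.pyGet?_eq_none_iff sb cs).mp hp) (not_not_intro hir)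
      · exact (emit_eq_filter s (e + 1) lq).symm
    · simp only [if_neg hsec]
      exact (emit_eq_filter 0 tq lq).symm
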